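-- pv_equiv track=rewrite | github.com/minus9d/programming_contest_archive | event/nomura2020/c/c.py | solve
-- ===== SOURCE A (Python) =====
-- def solve(N, As):
--     if N == 0:
--         if As[0] == 1:
--             return 1
--         else:
--             return -1
--
--     if As[0] != 0:
--         return -1
--
--     depth = N
--     mx = 2 ** depth
--     prev_leaf = None
--
--     leaf_sum = sum(As)
--
--     ans = 0
--     curr = 0
--     Vs = [None] * (N + 1)
--     for n in range(N + 1):
--         if n == 0:
--             curr = 1
--             ans += 1
--         else:
--             # 頂点を増やせるだけ増やす
--             curr2 = min(curr * 2, leaf_sum)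
--             # 矛盾したら終わり
--             if curr2 < As[n]:
--                 return -1
--             # 頂点全部足す
--             ans += curr2
--             # 次に残れる頂点
--             curr = curr2 - As[n]
--             # 使った葉のぶんを引く
--             leaf_sum -= As[n]
--
--     return ans
-- ===== SOURCE B (Python) =====
-- def solve(N, As):
--     if N == 0:
--         if As[0] == 1:
--             return 1
--         else:
--             return -1
--     if As[0] != 0:
--         return -1
--     total = sum(As)
--     # pass 1 (top-down): capacity at each depth, capped by the total leaf count
--     down = [1]
--     for d in range(1, N + 1):
--         down.append(min(2 * (down[d - 1] - As[d - 1]), total))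
--         if As[d] > down[d]:
--             return -1
--     # pass 2 (bottom-up): nodes actually used at depth d = min(capacity, leaf demand below)
--     nodes = 0
--     ans = 1  # the root
--     for d in range(N, 0, -1):
--         nodes = min(down[d], As[d] + nodes)
--         ans += nodes
--     return ans
-- ===== Notes on version B (the rewrite author's own statement) =====
-- stated objective: alternative
-- what changed: Replaces A's single fused forward sweep (running leaf budget, running answer, early consistency check interleaved) with two separate passes: a top-down pass tabulating per-depth capacities capped by the total leaf count (doing all feasibility checks), then a bottom-up pass computing the nodes actually used at each depth as min(capacity, leaf demand from below) and summing them.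
-- outside the precondition, e.g. on solve(1, [0, 0, 5]): A returns 3, B returns 1; on solve(-2, [0, 5]): A returns 0, B returns 1; on solve(2, [0, -1, 2]): A returns 4, B returns -1
import Mathlib
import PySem

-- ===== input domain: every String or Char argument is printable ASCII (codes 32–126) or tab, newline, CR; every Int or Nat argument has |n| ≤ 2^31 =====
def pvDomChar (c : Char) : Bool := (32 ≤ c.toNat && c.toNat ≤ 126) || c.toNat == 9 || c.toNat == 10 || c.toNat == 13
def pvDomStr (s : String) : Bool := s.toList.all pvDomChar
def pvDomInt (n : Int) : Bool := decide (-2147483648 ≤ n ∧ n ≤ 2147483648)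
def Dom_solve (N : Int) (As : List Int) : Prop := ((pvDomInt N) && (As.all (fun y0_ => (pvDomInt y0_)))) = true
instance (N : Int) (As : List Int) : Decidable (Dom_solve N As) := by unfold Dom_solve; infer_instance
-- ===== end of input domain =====

-- B replaces A's fused forward sweep by a top-down capacity table plus a separate
-- bottom-up demand pass (objective: alternative decomposition, not faster).
-- NOTE: As[0], As[n], down[d] are ported with pyGetD (default 0): under Pre_solve every
-- such index is in range, so this is exact there (where Python raises, Pre_solve excludes).

-- ===== PORT A =====
-- A's loop 'for n in range(N+1)', fuel = remaining iterations; state (n, curr, ans,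
-- leaf_sum) exactly as A keeps it ('mx', 'prev_leaf' and 'Vs' are unused in A and dropped)
def solveLoop (As : List Int) : Nat → Int → Int → Int → Int → Int
  | 0, _, _, ans, _ => ans
  | k + 1, n, curr, ans, leafSum =>
    if n = 0 then
      solveLoop As k (n + 1) 1 (ans + 1) leafSum
    else
      let curr2 := min (curr * 2) leafSum
      if curr2 < PySem.List.pyGetD As n 0 then -1
      else solveLoop As k (n + 1) (curr2 - PySem.List.pyGetD As n 0)
             (ans + curr2) (leafSum - PySem.List.pyGetD As n 0)

def solve (N : Int) (As : List Int) : Int :=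
  if N = 0 then
    if PySem.List.pyGetD As 0 0 = 1 then 1 else -1
  else if PySem.List.pyGetD As 0 0 ≠ 0 then -1
  else
    solveLoop As (N + 1).toNat 0 0 0 As.sum

-- ===== PORT B =====
-- pass 1 of Source B: 'for d in range(1, N+1)' appending to 'down'; none = its 'return -1'
def altPass1 (As : List Int) (total : Int) : Nat → Int → Int → List Int → Option (List Int)
  | 0, _, _, acc => some acc
  | k + 1, d, prev, acc =>
    let v := min (2 * (prev - PySem.List.pyGetD As (d - 1) 0)) total
    if PySem.List.pyGetD As d 0 > v then none
    else altPass1 As total k (d + 1) v (acc ++ [v])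

-- pass 2 of Source B: 'for d in range(N, 0, -1)' accumulating nodes and ans
def altPass2 (down As : List Int) : Nat → Int → Int → Int → Int
  | 0, _, _, ans => ans
  | k + 1, d, nodes, ans =>
    let nodes' := min (PySem.List.pyGetD down d 0) (PySem.List.pyGetD As d 0 + nodes)
    altPass2 down As k (d - 1) nodes' (ans + nodes')

def solve_alt (N : Int) (As : List Int) : Int :=
  if N = 0 then
    if PySem.List.pyGetD As 0 0 = 1 then 1 else -1
  else if PySem.List.pyGetD As 0 0 ≠ 0 then -1
  else
    match altPass1 As As.sum N.toNat 1 1 [1] with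
    | none => -1
    | some down => altPass2 down As N.toNat N 0 1

-- ===== PRECONDITION & SPEC =====
-- Pre_solve excludes: empty As and As shorter than N+1 when the sweep runs (A raises
-- IndexError there), and — a stated narrowing to the task's natural domain (a leaf-count
-- profile of a depth-N tree) — negative N, As longer than N+1 and negative leaf counts,
-- on which A's sweep still returns an accidental value; when an early guard decides
-- (N == 0, or As[0] != 0), any nonempty As is admitted.
def Pre_solve (N : Int) (As : List Int) : Prop :=
  As ≠ [] ∧ (N ≠ 0 → As.headD 0 = 0 →
    (1 ≤ N ∧ (As.length : Int) = N + 1 ∧ ∀ a ∈ As, 0 ≤ a))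
instance (N : Int) (As : List Int) : Decidable (Pre_solve N As) := by
  unfold Pre_solve; infer_instance

def pvWitness_solve : Int × List Int := (2, [0, 1, 2])

def Spec_solve (N : Int) (As : List Int) (out : Int) : Prop := out = solve_alt N As
instance (N : Int) (As : List Int) (out : Int) : Decidable (Spec_solve N As out) := by
  unfold Spec_solve; infer_instance

-- ===== CLAIM (what is proved, stated in full; the proofs are below) =====
def Claim_equal_solve : Prop :=
  ∀ (N : Int) (As : List Int), Dom_solve N As → Pre_solve N As → Spec_solve N As (solve N As)

-- ===== LEMMAS AND PROOFS =====

-- mathematical descriptions of the two sweeps: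
-- pvS n = leaves still unused when depth n is entered; pvC n = A's curr2 at depth n;
-- pvD n = B's down[n]; pvT M j = B's 'nodes' after j iterations of pass 2
def pvS (As : List Int) (n : Nat) : Int := (As.drop n).sum

def pvC (As : List Int) : Nat → Int
  | 0 => 1
  | n + 1 => min ((pvC As n - As.getD n 0) * 2) (pvS As (n + 1))

def pvD (As : List Int) : Nat → Int
  | 0 => 1
  | n + 1 => min (2 * (pvD As n - As.getD n 0)) (pvS As 0)

def pvT (As : List Int) (M : Nat) : Nat → Int
  | 0 => 0
  | j + 1 => min (pvD As (M - j)) (As.getD (M - j) 0 + pvT As M j)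

lemma pvS_succ (As : List Int) (n : Nat) :
    pvS As n = As.getD n 0 + pvS As (n + 1) := by
  unfold pvS
  by_cases h : n < As.length
  · rw [List.getD_eq_getElem As 0 h, ← List.getElem_cons_drop h, List.sum_cons]
  · rw [List.drop_eq_nil_of_le (by omega), List.drop_eq_nil_of_le (by omega),
      List.getD_eq_default As 0 (by omega)]
    simp

lemma pv_getD_nonneg (As : List Int) (hpos : ∀ a ∈ As, 0 ≤ a) (n : Nat) :
    0 ≤ As.getD n 0 := by
  by_cases h : n < As.length
  · rw [List.getD_eq_getElem As 0 h]; exact hpos _ (As.getElem_mem h)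
  · rw [List.getD_eq_default As 0 (by omega)]

lemma pvS_nonneg (As : List Int) (hpos : ∀ a ∈ As, 0 ≤ a) (n : Nat) :
    0 ≤ pvS As n :=
  List.sum_nonneg (fun x hx => hpos x (List.mem_of_mem_drop hx))

lemma pvS_le_zero (As : List Int) (hpos : ∀ a ∈ As, 0 ≤ a) (n : Nat) :
    pvS As n ≤ pvS As 0 := by
  induction n with
  | zero => exact le_refl _
  | succ n ih =>
    have h1 := pvS_succ As n
    have h2 := pv_getD_nonneg As hpos n
    omega

-- A's capacity equals B's capacity capped by the remaining leaves
lemma pvC_eq_min (As : List Int) (hpos : ∀ a ∈ As, 0 ≤ a) (n : Nat) :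
    pvC As (n + 1) = min (pvD As (n + 1)) (pvS As (n + 1)) := by
  induction n with
  | zero =>
    have h1 : pvS As 1 ≤ pvS As 0 := pvS_le_zero As hpos 1
    show min ((pvC As 0 - As.getD 0 0) * 2) (pvS As 1)
        = min (min (2 * (pvD As 0 - As.getD 0 0)) (pvS As 0)) (pvS As 1)
    show min ((1 - As.getD 0 0) * 2) (pvS As 1)
        = min (min (2 * (1 - As.getD 0 0)) (pvS As 0)) (pvS As 1)
    omega
  | succ n ih =>
    have h1 : pvS As (n + 1) = As.getD (n + 1) 0 + pvS As (n + 2) := pvS_succ As (n + 1)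
    have h2 : 0 ≤ pvS As (n + 2) := pvS_nonneg As hpos (n + 2)
    have h3 : pvS As (n + 2) ≤ pvS As 0 := pvS_le_zero As hpos (n + 2)
    show min ((pvC As (n + 1) - As.getD (n + 1) 0) * 2) (pvS As (n + 2))
        = min (min (2 * (pvD As (n + 1) - As.getD (n + 1) 0)) (pvS As 0)) (pvS As (n + 2))
    rw [ih]
    omega

-- the two feasibility tests agree pointwise
lemma pv_fail_iff (As : List Int) (hpos : ∀ a ∈ As, 0 ≤ a) (n : Nat) (hn : 1 ≤ n)
    (hlen : n < As.length) :
    (pvC As n < As.getD n 0 ↔ pvD As n < As.getD n 0) := by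
  obtain ⟨m, rfl⟩ : ∃ m, n = m + 1 := ⟨n - 1, by omega⟩
  have h1 := pvC_eq_min As hpos m
  have h2 : pvS As (m + 1) = As.getD (m + 1) 0 + pvS As (m + 1 + 1) := pvS_succ As (m + 1)
  have h3 : 0 ≤ pvS As (m + 1 + 1) := pvS_nonneg As hpos (m + 1 + 1)
  omega

lemma pvD_le_total (As : List Int) (n : Nat) (hn : 1 ≤ n) :
    pvD As n ≤ pvS As 0 := by
  obtain ⟨m, rfl⟩ : ∃ m, n = m + 1 := ⟨n - 1, by omega⟩
  show min (2 * (pvD As m - As.getD m 0)) (pvS As 0) ≤ pvS As 0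
  omega

-- with no feasibility failure, pass 2's nodes value is A's capacity
lemma pvT_eq_pvC (As : List Int) (M : Nat) (hpos : ∀ a ∈ As, 0 ≤ a)
    (hlen : As.length = M + 1) (hM : 1 ≤ M)
    (hnf : ∀ i, 1 ≤ i → i ≤ M → As.getD i 0 ≤ pvC As i) :
    ∀ j, 1 ≤ j → j ≤ M → pvT As M j = pvC As (M + 1 - j) := by
  intro j
  induction j with
  | zero => omega
  | succ j ih =>
    intro _ hjM
    by_cases hj0 : j = 0
    · subst hj0
      obtain ⟨m, rfl⟩ : ∃ m, M = m + 1 := ⟨M - 1, by omega⟩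
      show min (pvD As (m + 1 - 0)) (As.getD (m + 1 - 0) 0 + pvT As (m + 1) 0)
          = pvC As (m + 1 + 1 - 1)
      have h1 := pvC_eq_min As hpos m
      have h2 : pvS As (m + 1) = As.getD (m + 1) 0 + pvS As (m + 1 + 1) := pvS_succ As (m + 1)
      have h3 : pvS As (m + 1 + 1) = 0 := by
        unfold pvS; rw [List.drop_eq_nil_of_le (by omega)]; rfl
      simp only [Nat.sub_zero, Nat.add_sub_cancel, pvT]
      omega
    · -- j ≥ 1; let n := M - j, so 1 ≤ n ≤ M - 1
      have hih := ih (by omega) (by omega)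
      obtain ⟨n, hn⟩ : ∃ n, M - j = n := ⟨M - j, rfl⟩
      have hn1 : 1 ≤ n := by omega
      have hnM : n + 1 ≤ M := by omega
      have hMj : M + 1 - j = n + 1 := by omega
      have hMj2 : M + 1 - (j + 1) = n := by omega
      obtain ⟨m, rfl⟩ : ∃ m, n = m + 1 := ⟨n - 1, by omega⟩
      show min (pvD As (M - j)) (As.getD (M - j) 0 + pvT As M j) = pvC As (M + 1 - (j + 1))
      rw [hih, hn, hMj, hMj2]
      -- goal: min (d n) (A n + c (n+1)) = c n   with n = m+1
      have h1 := pvC_eq_min As hpos (m + 1)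
      have h2 := pvC_eq_min As hpos m
      have h3 : pvS As (m + 1) = As.getD (m + 1) 0 + pvS As (m + 1 + 1) := pvS_succ As (m + 1)
      have h4 : pvD As (m + 1 + 1)
          = min (2 * (pvD As (m + 1) - As.getD (m + 1) 0)) (pvS As 0) := rfl
      have h5 : pvD As (m + 1) ≤ pvS As 0 := pvD_le_total As (m + 1) (by omega)
      have h6 : As.getD (m + 1) 0 ≤ pvC As (m + 1) := hnf (m + 1) (by omega) (by omega)
      have h7 : 0 ≤ pvS As (m + 1 + 1) := pvS_nonneg As hpos (m + 1 + 1)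
      have h8 : 0 ≤ As.getD (m + 1) 0 := pv_getD_nonneg As hpos (m + 1)
      omega

-- A's loop, characterised by pvC
lemma loopA (As : List Int) (k : Nat) :
    ∀ (n : Nat) (ans : Int), 1 ≤ n →
    solveLoop As k (↑n) (pvC As (n - 1) - As.getD (n - 1) 0) ans (pvS As n)
    = if ∃ j ∈ Finset.Ico n (n + k), pvC As j < As.getD j 0 then -1
      else ans + ∑ j ∈ Finset.Ico n (n + k), pvC As j := by
  induction k with
  | zero => intro n ans _; simp [solveLoop]
  | succ k ih =>
    intro n ans hn
    obtain ⟨m, rfl⟩ : ∃ m, n = m + 1 := ⟨n - 1, by omega⟩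
    show solveLoop As (k + 1) (↑(m + 1)) (pvC As (m + 1 - 1) - As.getD (m + 1 - 1) 0) ans
        (pvS As (m + 1)) = _
    rw [solveLoop]
    have hne : ¬ ((↑(m + 1) : Int) = 0) := by push_cast; omega
    rw [if_neg hne]
    have hgd : PySem.List.pyGetD As (↑(m + 1)) 0 = As.getD (m + 1) 0 :=
      PySem.List.pyGetD_natCast As (m + 1) 0
    have hcurr2 : min ((pvC As (m + 1 - 1) - As.getD (m + 1 - 1) 0) * 2) (pvS As (m + 1))
        = pvC As (m + 1) := by
      simp only [Nat.add_sub_cancel]; rfl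
    simp only [hgd, hcurr2]
    by_cases hfail : pvC As (m + 1) < As.getD (m + 1) 0
    · rw [if_pos hfail,
        if_pos ⟨m + 1, Finset.mem_Ico.mpr ⟨by omega, by omega⟩, hfail⟩]
    · rw [if_neg hfail]
      have harg1 : (↑(m + 1) : Int) + 1 = ↑(m + 1 + 1) := by push_cast; ring
      have harg2 : pvC As (m + 1) - As.getD (m + 1) 0
          = pvC As (m + 1 + 1 - 1) - As.getD (m + 1 + 1 - 1) 0 := by norm_num
      have harg3 : pvS As (m + 1) - As.getD (m + 1) 0 = pvS As (m + 1 + 1) := by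
        have := pvS_succ As (m + 1); omega
      rw [harg1, harg2, harg3, ih (m + 1 + 1) (ans + pvC As (m + 1)) (by omega)]
      have hb : m + 1 + (k + 1) = m + 1 + 1 + k := by omega
      rw [hb]
      have hiff : (∃ j ∈ Finset.Ico (m + 1 + 1) (m + 1 + 1 + k), pvC As j < As.getD j 0)
          ↔ (∃ j ∈ Finset.Ico (m + 1) (m + 1 + 1 + k), pvC As j < As.getD j 0) := by
        constructor
        · rintro ⟨j, hj, hp⟩
          have hjm := Finset.mem_Ico.mp hj
          exact ⟨j, Finset.mem_Ico.mpr ⟨by omega, by omega⟩, hp⟩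
        · rintro ⟨j, hj, hp⟩
          have hjm := Finset.mem_Ico.mp hj
          refine ⟨j, Finset.mem_Ico.mpr ⟨?_, by omega⟩, hp⟩
          rcases Nat.eq_or_lt_of_le hjm.1 with h | h
          · exact absurd hp (by rw [← h]; exact hfail)
          · omega
      rw [if_congr hiff rfl rfl]
      by_cases hex : ∃ j ∈ Finset.Ico (m + 1) (m + 1 + 1 + k), pvC As j < As.getD j 0
      · rw [if_pos hex, if_pos hex]
      · rw [if_neg hex, if_neg hex,
          Finset.sum_eq_sum_Ico_succ_bot (by omega : m + 1 < m + 1 + 1 + k)]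
        ring

-- B's pass 1, characterised by pvD
lemma pass1 (As : List Int) (T : Int) (hT : pvS As 0 = T) (k : Nat) :
    ∀ (n : Nat) (acc : List Int), 1 ≤ n →
    altPass1 As T k (↑n) (pvD As (n - 1)) acc
    = if ∃ j ∈ Finset.Ico n (n + k), As.getD j 0 > pvD As j then none
      else some (acc ++ (List.range' n k).map (pvD As)) := by
  induction k with
  | zero => intro n acc _; simp [altPass1]
  | succ k ih =>
    intro n acc hn
    obtain ⟨m, rfl⟩ : ∃ m, n = m + 1 := ⟨n - 1, by omega⟩
    rw [altPass1]
    have hidx : (↑(m + 1) : Int) - 1 = ↑m := by push_cast; ring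
    have hgd1 : PySem.List.pyGetD As ((↑(m + 1) : Int) - 1) 0 = As.getD m 0 := by
      rw [hidx]; exact PySem.List.pyGetD_natCast As m 0
    have hgd2 : PySem.List.pyGetD As (↑(m + 1)) 0 = As.getD (m + 1) 0 :=
      PySem.List.pyGetD_natCast As (m + 1) 0
    have hv : min (2 * (pvD As m - As.getD m 0)) T = pvD As (m + 1) := by
      rw [← hT]; rfl
    simp only [hgd1, hgd2, Nat.add_sub_cancel, hv]
    by_cases hfail : As.getD (m + 1) 0 > pvD As (m + 1)
    · rw [if_pos hfail,
        if_pos ⟨m + 1, Finset.mem_Ico.mpr ⟨by omega, by omega⟩, hfail⟩]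
    · rw [if_neg hfail]
      have harg1 : (↑(m + 1) : Int) + 1 = ↑(m + 1 + 1) := by push_cast; ring
      have hprev : pvD As (m + 1) = pvD As (m + 1 + 1 - 1) := by norm_num
      rw [harg1, hprev, ih (m + 1 + 1) (acc ++ [pvD As (m + 1 + 1 - 1)]) (by omega)]
      have hb : m + 1 + (k + 1) = m + 1 + 1 + k := by omega
      rw [hb]
      have hiff : (∃ j ∈ Finset.Ico (m + 1 + 1) (m + 1 + 1 + k), As.getD j 0 > pvD As j)
          ↔ (∃ j ∈ Finset.Ico (m + 1) (m + 1 + 1 + k), As.getD j 0 > pvD As j) := by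
        constructor
        · rintro ⟨j, hj, hp⟩
          have hjm := Finset.mem_Ico.mp hj
          exact ⟨j, Finset.mem_Ico.mpr ⟨by omega, by omega⟩, hp⟩
        · rintro ⟨j, hj, hp⟩
          have hjm := Finset.mem_Ico.mp hj
          refine ⟨j, Finset.mem_Ico.mpr ⟨?_, by omega⟩, hp⟩
          rcases Nat.eq_or_lt_of_le hjm.1 with h | h
          · exact absurd hp (by rw [← h]; exact hfail)
          · omega
      rw [if_congr hiff rfl rfl]
      by_cases hex : ∃ j ∈ Finset.Ico (m + 1) (m + 1 + 1 + k), As.getD j 0 > pvD As j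
      · rw [if_pos hex, if_pos hex]
      · rw [if_neg hex, if_neg hex]
        have hr : List.range' (m + 1) (k + 1) = (m + 1) :: List.range' (m + 1 + 1) k := by
          rw [List.range'_succ]
        rw [hr]
        simp

-- indexing into the finished 'down' list
lemma down_getD (As : List Int) (M : Nat) :
    ∀ i, i ≤ M → (((1 : Int) :: (List.range' 1 M).map (pvD As)).getD i 0) = pvD As i := by
  intro i hi
  cases i with
  | zero => rfl
  | succ i =>
    have hlen : i < ((List.range' 1 M).map (pvD As)).length := by
      simp; omega
    show ((List.range' 1 M).map (pvD As)).getD i 0 = pvD As (i + 1)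
    rw [List.getD_eq_getElem _ 0 hlen]
    simp [List.getElem_range']
    rw [Nat.add_comm]

-- B's pass 2, characterised by pvT
lemma pass2 (down As : List Int) (M : Nat)
    (hdown : ∀ i, i ≤ M → down.getD i 0 = pvD As i) (k : Nat) :
    ∀ (j : Nat) (ans : Int), j + k ≤ M →
    altPass2 down As k (↑(M - j)) (pvT As M j) ans
    = ans + ∑ i ∈ Finset.Ico (j + 1) (j + 1 + k), pvT As M i := by
  induction k with
  | zero => intro j ans _; simp [altPass2]
  | succ k ih =>
    intro j ans hjk
    rw [altPass2]
    have hgd1 : PySem.List.pyGetD down (↑(M - j)) 0 = pvD As (M - j) := by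
      rw [PySem.List.pyGetD_natCast]; exact hdown _ (by omega)
    have hgd2 : PySem.List.pyGetD As (↑(M - j)) 0 = As.getD (M - j) 0 :=
      PySem.List.pyGetD_natCast As (M - j) 0
    have hnodes : min (pvD As (M - j)) (As.getD (M - j) 0 + pvT As M j) = pvT As M (j + 1) := rfl
    have hidx : (↑(M - j) : Int) - 1 = ↑(M - (j + 1)) := by omega
    simp only [hgd1, hgd2, hnodes, hidx]
    rw [ih (j + 1) (ans + pvT As M (j + 1)) (by omega)]
    rw [Finset.sum_eq_sum_Ico_succ_bot (by omega : j + 1 < j + 1 + (k + 1))]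
    have h1 : j + 1 + 1 = j + 2 := rfl
    have h2 : j + 1 + (k + 1) = j + 2 + k := by omega
    rw [h1, h2]
    ring

-- the two sums agree: pass 2 enumerates A's capacities in reverse order
lemma sum_pvT_eq_sum_pvC (As : List Int) (M : Nat) (hpos : ∀ a ∈ As, 0 ≤ a)
    (hlen : As.length = M + 1) (hM : 1 ≤ M)
    (hnf : ∀ i, 1 ≤ i → i ≤ M → As.getD i 0 ≤ pvC As i) :
    ∑ i ∈ Finset.Ico 1 (1 + M), pvT As M i = ∑ i ∈ Finset.Ico 1 (1 + M), pvC As i := by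
  have hT := pvT_eq_pvC As M hpos hlen hM hnf
  rw [Finset.sum_Ico_eq_sum_range, Finset.sum_Ico_eq_sum_range]
  simp only [Nat.add_sub_cancel_left]
  calc ∑ i ∈ Finset.range M, pvT As M (1 + i)
      = ∑ i ∈ Finset.range M, pvC As ((M - 1 - i) + 1) := by
        apply Finset.sum_congr rfl
        intro i hi
        have hiM : i < M := Finset.mem_range.mp hi
        rw [hT (1 + i) (by omega) (by omega)]
        congr 1
        omega
    _ = ∑ i ∈ Finset.range M, pvC As (i + 1) :=
        Finset.sum_range_reflect (fun i => pvC As (i + 1)) M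
    _ = ∑ i ∈ Finset.range M, pvC As (1 + i) := by
        apply Finset.sum_congr rfl; intro i _; congr 1; omega

-- ===== VERDICT (by name: the statement is the Claim_ definition above) =====
theorem solve_spec : Claim_equal_solve := by
  intro N As _ hpre
  unfold Spec_solve solve solve_alt
  obtain ⟨hne, hrest⟩ := hpre
  rcases As with _ | ⟨a0, rest⟩
  · exact absurd rfl hne
  have hgd0 : PySem.List.pyGetD (a0 :: rest) 0 0 = a0 := by simp
  by_cases hN : N = 0
  · simp [hN]
  · rw [if_neg hN, if_neg hN]
    by_cases h0 : a0 = 0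
    swap
    · rw [if_pos (by simpa [hgd0] using h0), if_pos (by simpa [hgd0] using h0)]
    · rw [if_neg (by simpa [hgd0] using h0), if_neg (by simpa [hgd0] using h0)]
      obtain ⟨hN1, hlenI, hpos⟩ := hrest hN (by simpa using h0)
      set As := a0 :: rest with hAs
      -- M := N.toNat; basic arithmetic facts
      obtain ⟨M, hMN⟩ : ∃ M : Nat, (↑M : Int) = N := ⟨N.toNat, Int.toNat_of_nonneg (by omega)⟩
      have hM1 : 1 ≤ M := by omega
      have hlen : As.length = M + 1 := by omega
      have htn1 : (N + 1).toNat = M + 1 := by omega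
      have htn2 : N.toNat = M := by omega
      have hS0 : pvS As 0 = As.sum := rfl
      have hS1 : pvS As 1 = As.sum := by
        have h := pvS_succ As 0
        simp only [Nat.zero_add] at h
        have hA0 : As.getD 0 0 = 0 := by simp [hAs, h0]
        omega
      -- LHS: A's sweep
      have hlhs : solveLoop As (M + 1) 0 0 0 As.sum
          = if ∃ j ∈ Finset.Ico 1 (1 + M), pvC As j < As.getD j 0 then -1
            else (0 + 1) + ∑ j ∈ Finset.Ico 1 (1 + M), pvC As j := by
        rw [solveLoop, if_pos rfl]
        have hcurr : (1 : Int) = pvC As (1 - 1) - As.getD (1 - 1) 0 := by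
          simp [hAs, pvC, h0]
        calc solveLoop As M (0 + 1) 1 (0 + 1) As.sum
            = solveLoop As M (↑(1 : Nat)) (pvC As (1 - 1) - As.getD (1 - 1) 0) (0 + 1)
                (pvS As 1) := by rw [← hcurr, hS1]; norm_num
          _ = _ := loopA As M 1 (0 + 1) (by omega)
      -- RHS: B's two passes
      have hrhs1 := pass1 As As.sum hS0 M 1 [1] (by omega)
      have hD0 : pvD As (1 - 1) = 1 := rfl
      simp only [hD0, Nat.cast_one] at hrhs1
      rw [htn1, htn2, hlhs, hrhs1]
      -- the two failure tests agree
      have hiff : (∃ j ∈ Finset.Ico 1 (1 + M), pvC As j < As.getD j 0)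
          ↔ (∃ j ∈ Finset.Ico 1 (1 + M), As.getD j 0 > pvD As j) := by
        constructor <;> rintro ⟨j, hj, hp⟩ <;> refine ⟨j, hj, ?_⟩ <;>
          have hjm := Finset.mem_Ico.mp hj <;>
          have := pv_fail_iff As hpos j (by omega) (by omega) <;> omega
      by_cases hex : ∃ j ∈ Finset.Ico 1 (1 + M), pvC As j < As.getD j 0
      · rw [if_pos hex, if_pos (hiff.mp hex)]
      · rw [if_neg hex, if_neg (fun h => hex (hiff.mpr h))]
        -- no failure: run pass 2
        have hnf : ∀ i, 1 ≤ i → i ≤ M → As.getD i 0 ≤ pvC As i := by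
          intro i h1 h2
          by_contra hc
          exact hex ⟨i, Finset.mem_Ico.mpr ⟨h1, by omega⟩, by omega⟩
        have hp2 := pass2 ((1 : Int) :: List.map (pvD As) (List.range' 1 M)) As M
          (down_getD As M) M 0 1 (by omega)
        simp only [Nat.sub_zero] at hp2
        rw [hMN] at hp2
        have ht0 : pvT As M 0 = 0 := rfl
        rw [ht0] at hp2
        simp only [List.singleton_append]
        rw [hp2, sum_pvT_eq_sum_pvC As M hpos hlen hM1 hnf]
        norm_num
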